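-- pv_equiv track=rewrite | github.com/pypi-data/pypi-code-97 | mhi-pscad/mhi_pscad-2.3.3-py3-none-any.whl/pscad/canvas.py | _orthogonal
-- ===== SOURCE A (Python) =====
-- def _orthogonal(vertices):
--     """
--     Turn a list of [x,y] pairs into a list of [x,y] pairs where
--       - successive vertices are different
--       - successive vertices are either horizontal or vertical
--     """
--
--     if not vertices:
--         raise ValueError("At least one vertex must be supplied")
--
--     vertexes = []
--
--     itr = iter(vertices)
--     vtx = next(itr)
--     x_prev, y_prev = vtx[0], vtx[1]
--     vertexes.append((x_prev, y_prev))
--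
--     for vtx in itr:
--         x, y = vtx[0], vtx[1]
--         if x != x_prev or y != y_prev:
--             if x != x_prev and y != y_prev:
--                 vertexes.append((x_prev, y))
--             vertexes.append((x, y))
--             x_prev, y_prev = x, y
--
--     return vertexes
-- ===== SOURCE B (Python) =====
-- def _orthogonal(vertices):
--     if not vertices:
--         raise ValueError("At least one vertex must be supplied")
--     # pass 1: consecutive dedup of (x, y) points
--     pts = [(vertices[0][0], vertices[0][1])]
--     for vtx in vertices[1:]:
--         p = (vtx[0], vtx[1])
--         if p != pts[-1]:
--             pts.append(p)
--     # pass 2: insert a corner for each diagonal pair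
--     out = [pts[0]]
--     for i in range(1, len(pts)):
--         px, py = pts[i - 1]
--         x, y = pts[i]
--         if x != px and y != py:
--             out.append((px, y))
--         out.append((x, y))
--     return out
-- ===== Notes on version B (the rewrite author's own statement) =====
-- stated objective: alternative
-- what changed: Replaces A's single fused loop carrying (x_prev, y_prev) state with two separate passes: first a consecutive-duplicate dedup of the point list, then a pair-wise pass that inserts a corner point for each diagonal step.
import Mathlib
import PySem

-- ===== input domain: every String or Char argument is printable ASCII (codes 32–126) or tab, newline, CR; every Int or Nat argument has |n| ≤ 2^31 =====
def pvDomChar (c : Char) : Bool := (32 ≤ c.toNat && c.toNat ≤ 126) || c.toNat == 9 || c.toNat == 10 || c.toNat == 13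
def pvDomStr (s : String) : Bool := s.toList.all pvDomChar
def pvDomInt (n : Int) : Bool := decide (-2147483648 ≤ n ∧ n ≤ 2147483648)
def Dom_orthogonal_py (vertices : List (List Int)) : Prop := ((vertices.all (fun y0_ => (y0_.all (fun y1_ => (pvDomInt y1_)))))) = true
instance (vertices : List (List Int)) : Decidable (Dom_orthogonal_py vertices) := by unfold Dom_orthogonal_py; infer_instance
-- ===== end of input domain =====

-- B changes the decomposition only (two simple passes instead of one fused stateful loop); equal on Pre_.

-- ===== PORT A =====
-- A's fused loop: carries (x_prev, y_prev) and the accumulated vertexes.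
-- vtx[0]/vtx[1] are total here because Pre_ guarantees every vertex has length ≥ 2
-- (outside Pre_ Python raises IndexError; .getD 0 is never reached on Pre_).
def orthoALoop : Int → Int → List (Int × Int) → List (List Int) → List (Int × Int)
  | _, _, acc, [] => acc
  | xp, yp, acc, v :: itr =>
    let x := (PySem.List.pyGet? v 0).getD 0
    let y := (PySem.List.pyGet? v 1).getD 0
    if x ≠ xp ∨ y ≠ yp then
      let acc1 := if x ≠ xp ∧ y ≠ yp then acc ++ [(xp, y)] else acc
      orthoALoop x y (acc1 ++ [(x, y)]) itr
    else
      orthoALoop xp yp acc itr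

def orthogonal_py (vertices : List (List Int)) : List (Int × Int) :=
  match vertices with
  | [] => []   -- Python raises ValueError here; excluded by Pre_
  | v :: itr =>
    let xp := (PySem.List.pyGet? v 0).getD 0
    let yp := (PySem.List.pyGet? v 1).getD 0
    orthoALoop xp yp [(xp, yp)] itr

-- ===== PORT B =====
-- pass 1: consecutive dedup against the last kept point
def orthoDedup : Int × Int → List (List Int) → List (Int × Int)
  | _, [] => []
  | last, v :: rest =>
    let p := ((PySem.List.pyGet? v 0).getD 0, (PySem.List.pyGet? v 1).getD 0)
    if p ≠ last then p :: orthoDedup p rest else orthoDedup last rest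

-- pass 2: for each consecutive pair, insert a corner when both coordinates change
def orthoCorners : Int × Int → List (Int × Int) → List (Int × Int)
  | _, [] => []
  | (px, py), (x, y) :: rest =>
    (if x ≠ px ∧ y ≠ py then [(px, y), (x, y)] else [(x, y)]) ++ orthoCorners (x, y) rest

def orthogonal_py_alt (vertices : List (List Int)) : List (Int × Int) :=
  match vertices with
  | [] => []   -- Python raises ValueError here; excluded by Pre_
  | v :: rest =>
    let p0 := ((PySem.List.pyGet? v 0).getD 0, (PySem.List.pyGet? v 1).getD 0)
    p0 :: orthoCorners p0 (orthoDedup p0 rest)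

-- ===== PRECONDITION & SPEC =====
-- Pre_ excludes exactly the inputs where A raises: the empty list (ValueError) and
-- any vertex with fewer than 2 coordinates (IndexError on vtx[0]/vtx[1]).
def Pre_orthogonal_py (vertices : List (List Int)) : Prop :=
  vertices ≠ [] ∧ ∀ v ∈ vertices, 2 ≤ v.length
instance (vertices : List (List Int)) : Decidable (Pre_orthogonal_py vertices) := by
  unfold Pre_orthogonal_py; infer_instance
def pvWitness_orthogonal_py : List (List Int) := [[0, 0], [2, 3], [2, 3], [5, 3]]

def Spec_orthogonal_py (vertices : List (List Int)) (out : List (Int × Int)) : Prop := out = orthogonal_py_alt vertices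
instance (vertices : List (List Int)) (out : List (Int × Int)) : Decidable (Spec_orthogonal_py vertices out) := by unfold Spec_orthogonal_py; infer_instance

-- ===== CLAIM (what is proved, stated in full; the proofs are below) =====
def Claim_equal_orthogonal_py : Prop := ∀ (vertices : List (List Int)), Dom_orthogonal_py vertices → Pre_orthogonal_py vertices → Spec_orthogonal_py vertices (orthogonal_py vertices)

-- ===== LEMMAS AND PROOFS =====

lemma orthoALoop_eq (itr : List (List Int)) :
    ∀ (xp yp : Int) (acc : List (Int × Int)),
      orthoALoop xp yp acc itr = acc ++ orthoCorners (xp, yp) (orthoDedup (xp, yp) itr) := by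
  induction itr with
  | nil => intro xp yp acc; simp [orthoALoop, orthoDedup, orthoCorners]
  | cons v rest ih =>
    intro xp yp acc
    simp only [orthoALoop, orthoDedup]
    set x := (PySem.List.pyGet? v 0).getD 0 with hx
    set y := (PySem.List.pyGet? v 1).getD 0 with hy
    by_cases hne : x ≠ xp ∨ y ≠ yp
    · have hp : ((x, y) ≠ (xp, yp)) := by
        intro h; injection h with h1 h2; rcases hne with h | h <;> [exact h h1; exact h h2]
      rw [if_pos hne, if_pos hp, ih]
      by_cases hb : x ≠ xp ∧ y ≠ yp
      · rw [if_pos hb]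
        simp [orthoCorners, if_pos hb]
      · rw [if_neg hb]
        simp [orthoCorners, if_neg hb]
    · push Not at hne
      have hp : ¬ ((x, y) ≠ (xp, yp)) := by simp [hne.1, hne.2]
      rw [if_neg (by simpa using hne), if_neg hp, ih]

theorem orthogonal_py_spec : Claim_equal_orthogonal_py := by
  intro vertices _ _
  unfold Spec_orthogonal_py
  cases vertices with
  | nil => rfl
  | cons v rest =>
    simp only [orthogonal_py, orthogonal_py_alt]
    rw [orthoALoop_eq]
    rfl
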